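-- pv_equiv track=rewrite | github.com/Eric-meiyan/transcriptpro | backend/app/services/transcription_pipeline.py | is_youtube_url
-- ===== SOURCE A (Python) =====
-- def is_youtube_url(url: str) -> bool:
--     """Check if URL is a YouTube video."""
--     youtube_patterns = [
--         "youtube.com/watch",
--         "youtu.be/",
--         "youtube.com/shorts/",
--         "youtube.com/live/",
--         "m.youtube.com/watch",
--     ]
--     return any(p in url for p in youtube_patterns)
-- ===== SOURCE B (Python) =====
-- # Every YouTube video pattern starts with "youtu", so instead of one
-- # containment pass per pattern, jump between occurrences of that anchor with
-- # str.find and test the full patterns only there ("m.youtube.com/watch" is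
-- # already covered by "youtube.com/watch").
-- _PATTERNS = ("youtube.com/watch", "youtu.be/", "youtube.com/shorts/", "youtube.com/live/")
--
-- def is_youtube_url(url: str) -> bool:
--     """Check if URL is a YouTube video."""
--     i = url.find("youtu")
--     while i != -1:
--         if url.startswith(_PATTERNS, i):
--             return True
--         i = url.find("youtu", i + 1)
--     return False
-- ===== Notes on version B (the rewrite author's own statement) =====
-- stated objective: alternative
-- what changed: Replaces five independent substring-containment passes by a find-driven scan that jumps between occurrences of the common anchor 'youtu' and tests the full patterns only at those positions, dropping the redundant 'm.youtube.com/watch' (subsumed by 'youtube.com/watch').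
import Mathlib
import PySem

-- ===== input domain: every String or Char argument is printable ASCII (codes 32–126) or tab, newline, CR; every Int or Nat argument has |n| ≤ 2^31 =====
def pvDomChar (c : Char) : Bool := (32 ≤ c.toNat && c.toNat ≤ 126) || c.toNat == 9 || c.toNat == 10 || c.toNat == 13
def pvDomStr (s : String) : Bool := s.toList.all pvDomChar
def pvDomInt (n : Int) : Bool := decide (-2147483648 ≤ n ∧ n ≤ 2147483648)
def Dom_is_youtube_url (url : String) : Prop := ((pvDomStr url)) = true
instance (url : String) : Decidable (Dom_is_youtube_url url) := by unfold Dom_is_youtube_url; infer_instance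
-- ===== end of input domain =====

-- B scans only the occurrences of the common anchor "youtu" (found with str.find)
-- and tests the full patterns there, instead of one containment pass per pattern;
-- objective: alternative algorithm, same result.

-- ===== PORT A =====
def is_youtube_url (url : String) : Bool :=
  let youtube_patterns : List String :=
    ["youtube.com/watch", "youtu.be/", "youtube.com/shorts/",
     "youtube.com/live/", "m.youtube.com/watch"]
  youtube_patterns.any (fun p => PySem.Str.isIn p url)

-- ===== PORT B =====
def altPatterns : List (List Char) :=
  ["youtube.com/watch".toList, "youtu.be/".toList,
   "youtube.com/shorts/".toList, "youtube.com/live/".toList]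

def altAnchor : List Char := "youtu".toList

-- the 'while i != -1' loop; fuel only makes the recursion structural (the loop
-- itself terminates because str.find from i+1 never returns an index ≤ i).
-- 'url.startswith(_PATTERNS, i)' is ported as prefix tests on s.drop i.toNat,
-- exact for the 0 ≤ i that the loop maintains.
def altLoop (s : List Char) : Nat → Int → Bool
  | 0, _ => false
  | fuel + 1, i =>
      if i = -1 then false
      else if altPatterns.any (fun p => PySem.Chars.startswith (s.drop i.toNat) p) then true
      else altLoop s fuel (PySem.Chars.findFrom s altAnchor (i + 1))

def is_youtube_url_alt (url : String) : Bool :=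
  altLoop url.toList (url.toList.length + 1) (PySem.Chars.find url.toList altAnchor)

-- ===== PRECONDITION & SPEC =====
def Spec_is_youtube_url (url : String) (out : Bool) : Prop := out = is_youtube_url_alt url
instance (url : String) (out : Bool) : Decidable (Spec_is_youtube_url url out) := by unfold Spec_is_youtube_url; infer_instance

-- ===== CLAIM (what is proved, stated in full; the proofs are below) =====
def Claim_equal_is_youtube_url : Prop := ∀ (url : String), Dom_is_youtube_url url → Spec_is_youtube_url url (is_youtube_url url)

-- ===== LEMMAS AND PROOFS =====

-- every B-pattern starts with the anchor "youtu"
theorem anchor_prefix_pattern : ∀ p ∈ altPatterns, altAnchor <+: p := by decide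

-- a pattern prefix at j ≥ k is an infix of the suffix from k
theorem prefix_drop_infix {p s : List Char} {j k : Nat} (hk : k ≤ j)
    (h : p <+: s.drop j) : p <:+: s.drop k := by
  have : s.drop j = (s.drop k).drop (j - k) := by
    rw [List.drop_drop]; congr 1; omega
  rw [this] at h
  exact h.isInfix.trans (List.drop_suffix _ _).isInfix

-- main loop invariant: starting the search at k with enough fuel, the loop
-- returns true iff some pattern occurs at a position ≥ k
theorem altLoop_spec (s : List Char) (fuel : Nat) :
    ∀ k : Nat, k ≤ s.length → s.length + 1 - k ≤ fuel →
    (altLoop s fuel (PySem.Chars.findFrom s altAnchor k) = true ↔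
      ∃ p ∈ altPatterns, ∃ j, k ≤ j ∧ p <+: s.drop j) := by
  induction fuel with
  | zero => intro k hk hf; omega
  | succ fuel ih =>
      intro k hk hf
      by_cases hneg : PySem.Chars.findFrom s altAnchor (k : Int) = -1
      · -- no anchor at ≥ k: no pattern can occur there
        have hL : altLoop s (fuel + 1) (PySem.Chars.findFrom s altAnchor (k : Int)) = false := by
          simp [altLoop, hneg]
        rw [hL]
        have hnoanchor : ¬ altAnchor <:+: s.drop k :=
          (PySem.Chars.findFrom_natCast_eq_neg_one_iff s altAnchor k hk).mp hneg
        simp only [Bool.false_eq_true, false_iff]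
        rintro ⟨p, hp, j, hkj, hpre⟩
        exact hnoanchor (((anchor_prefix_pattern p hp).trans hpre).isInfix.trans
          (prefix_drop_infix hkj (List.prefix_refl _)))
      · obtain ⟨hki, hpre, hmin⟩ :=
          PySem.Chars.findFrom_natCast_spec s altAnchor k hk hneg
        set i := PySem.Chars.findFrom s altAnchor (k : Int) with hi
        have hipos : 0 ≤ i := le_trans (by exact_mod_cast Nat.zero_le k) hki
        have hanlen : altAnchor.length = 5 := by decide
        have hilen : i.toNat + 5 ≤ s.length := by
          have hle := hpre.length_le
          rw [List.length_drop, hanlen] at hle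
          omega
        have hkiN : k ≤ i.toNat := by omega
        by_cases hhit : altPatterns.any (fun p => PySem.Chars.startswith (s.drop i.toNat) p) = true
        · have hL : altLoop s (fuel + 1) i = true := by
            simp [altLoop, hneg, hhit]
          rw [hL]
          simp only [true_iff]
          simp only [List.any_eq_true, PySem.Chars.startswith_iff] at hhit
          obtain ⟨p, hp, hpp⟩ := hhit
          exact ⟨p, hp, i.toNat, hkiN, hpp⟩
        · have hstep : altLoop s (fuel + 1) i =
              altLoop s fuel (PySem.Chars.findFrom s altAnchor (i + 1)) := by
            simp [altLoop, hneg, hhit]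
          have hcast : (i + 1 : Int) = ((i.toNat + 1 : Nat) : Int) := by omega
          have hk' : i.toNat + 1 ≤ s.length := by omega
          have hf' : s.length + 1 - (i.toNat + 1) ≤ fuel := by omega
          rw [hstep, hcast, ih (i.toNat + 1) hk' hf']
          -- no pattern occurs in [k, i.toNat]: below i it would force an anchor
          -- before the first one; at i the startswith test just failed
          constructor
          · rintro ⟨p, hp, j, hj, hpre'⟩; exact ⟨p, hp, j, by omega, hpre'⟩
          · rintro ⟨p, hp, j, hj, hpre'⟩
            refine ⟨p, hp, j, ?_, hpre'⟩
            rcases Nat.lt_or_ge j (i.toNat + 1) with hlt | hge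
            · rcases Nat.lt_or_ge j i.toNat with hji | hji
              · exact absurd ((anchor_prefix_pattern p hp).trans hpre') (hmin j hj hji)
              · have hji' : j = i.toNat := by omega
                subst hji'
                exact absurd (by
                  simp only [List.any_eq_true, PySem.Chars.startswith_iff]
                  exact ⟨p, hp, hpre'⟩) hhit
            · exact hge

-- the m.* pattern is redundant: it contains "youtube.com/watch"
theorem m_pattern_redundant (u : List Char) :
    "m.youtube.com/watch".toList <:+: u → "youtube.com/watch".toList <:+: u := by
  intro h
  refine List.IsInfix.trans ?_ h
  exact ⟨['m', '.'], [], by decide⟩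

theorem ports_agree (url : String) : is_youtube_url url = is_youtube_url_alt url := by
  have halt : is_youtube_url_alt url = true ↔
      ∃ p ∈ altPatterns, ∃ j, 0 ≤ j ∧ p <+: url.toList.drop j := by
    have h0 : PySem.Chars.find url.toList altAnchor =
        PySem.Chars.findFrom url.toList altAnchor (0 : Nat) := by
      exact (by simp : ((0:Nat):Int) = 0) ▸ (PySem.Chars.findFrom_zero url.toList altAnchor).symm
    unfold is_youtube_url_alt
    rw [h0]
    exact altLoop_spec url.toList (url.toList.length + 1) 0 (Nat.zero_le _) (by omega)
  have hiff : is_youtube_url url = true ↔ is_youtube_url_alt url = true := by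
    rw [halt]
    simp only [is_youtube_url, List.any_eq_true, PySem.Str.isIn_eq]
    constructor
    · rintro ⟨p, hp, hin⟩
      have hin' := (PySem.Chars.isIn_iff_infix _ _).mp hin
      simp only [List.mem_cons, List.not_mem_nil, or_false] at hp
      have hpick : ∃ q ∈ altPatterns, q <:+: url.toList := by
        rcases hp with h | h | h | h | h
        all_goals subst h
        · exact ⟨_, by simp [altPatterns], hin'⟩
        · exact ⟨_, by simp [altPatterns], hin'⟩
        · exact ⟨_, by simp [altPatterns], hin'⟩
        · exact ⟨_, by simp [altPatterns], hin'⟩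
        · exact ⟨_, by simp [altPatterns], m_pattern_redundant _ hin'⟩
      obtain ⟨q, hq, hqin⟩ := hpick
      obtain ⟨j, hj⟩ := (PySem.Chars.exists_prefix_drop_iff_isIn q url.toList).mpr
        ((PySem.Chars.isIn_iff_infix _ _).mpr hqin)
      exact ⟨q, hq, j, Nat.zero_le _, hj⟩
    · rintro ⟨p, hp, j, _, hdrop⟩
      have hin := (PySem.Chars.exists_prefix_drop_iff_isIn _ _).mp ⟨j, hdrop⟩
      simp only [altPatterns, List.mem_cons, List.not_mem_nil, or_false] at hp
      rcases hp with h | h | h | h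
      all_goals subst h
      · exact ⟨"youtube.com/watch", by simp, hin⟩
      · exact ⟨"youtu.be/", by simp, hin⟩
      · exact ⟨"youtube.com/shorts/", by simp, hin⟩
      · exact ⟨"youtube.com/live/", by simp, hin⟩
  cases hA : is_youtube_url url
  · cases hB : is_youtube_url_alt url
    · rfl
    · exact absurd (hiff.mpr hB) (by simp [hA])
  · exact (hiff.mp hA).symm

-- ===== VERDICT (by name: the statement is the Claim_ definition above) =====
theorem is_youtube_url_spec : Claim_equal_is_youtube_url := by
  intro url _
  unfold Spec_is_youtube_url
  exact ports_agree url
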